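-- pv_equiv track=rewrite | github.com/sethdford/gemma-realtime | scripts/extract-facebook.py | build_conversation_windows
-- ===== SOURCE A (Python) =====
-- MAX_GAP_SECONDS = 3600
--
-- def build_conversation_windows(chat_messages: list[dict]) -> list[list[dict]]:
--     windows = []
--     current = []
--     for msg in chat_messages:
--         if current and msg["timestamp"] - current[-1]["timestamp"] > MAX_GAP_SECONDS:
--             if current:
--                 windows.append(current)
--             current = []
--         current.append(msg)
--     if current:
--         windows.append(current)
--     return windows
-- ===== SOURCE B (Python) =====
-- MAX_GAP_SECONDS = 3600
--
-- def build_conversation_windows(chat_messages: list[dict]) -> list[list[dict]]: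
--     if not chat_messages:
--         return []
--     n = len(chat_messages)
--     starts = [0] + [i for i in range(1, n)
--                     if chat_messages[i]["timestamp"] - chat_messages[i - 1]["timestamp"] > MAX_GAP_SECONDS]
--     starts.append(n)
--     return [chat_messages[a:b] for a, b in zip(starts, starts[1:])]
-- ===== Notes on version B (the rewrite author's own statement) =====
-- stated objective: alternative
-- what changed: B replaces A's single-pass windows/current accumulator with two separate passes: first collect the boundary indices where the timestamp gap exceeds MAX_GAP_SECONDS, then build each window by slicing between consecutive boundaries.
import Mathlib
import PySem

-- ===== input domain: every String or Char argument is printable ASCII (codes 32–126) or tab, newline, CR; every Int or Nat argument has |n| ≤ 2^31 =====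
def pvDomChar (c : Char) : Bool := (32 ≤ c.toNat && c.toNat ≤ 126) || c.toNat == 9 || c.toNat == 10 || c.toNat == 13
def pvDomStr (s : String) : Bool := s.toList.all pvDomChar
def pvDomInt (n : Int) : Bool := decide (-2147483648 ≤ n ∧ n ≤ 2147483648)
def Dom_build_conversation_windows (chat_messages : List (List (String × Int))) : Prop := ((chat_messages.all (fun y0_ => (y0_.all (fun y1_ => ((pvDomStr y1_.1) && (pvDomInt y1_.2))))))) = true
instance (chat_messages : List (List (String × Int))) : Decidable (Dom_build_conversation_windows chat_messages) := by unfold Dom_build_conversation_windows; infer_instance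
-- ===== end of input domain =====

-- B groups messages by first collecting the gap-boundary indices and then slicing between
-- consecutive boundaries (two passes), instead of A's single-pass windows/current accumulator;
-- alternative decomposition, same cost.

-- ===== PORT A =====
-- msg["timestamp"]: first-match lookup in the association list (guarded by Pre_ below).
def pvTs (m : List (String × Int)) : Int := (m.lookup "timestamp").getD 0

-- one iteration of A's for-loop over state (windows, current)
def pvStep (s : List (List (List (String × Int))) × List (List (String × Int)))
    (msg : List (String × Int)) :
    List (List (List (String × Int))) × List (List (String × Int)) :=
  if s.2 ≠ [] ∧ pvTs msg - pvTs (PySem.List.pyGetD s.2 (-1) []) > 3600 then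
    ((if s.2 ≠ [] then s.1 ++ [s.2] else s.1), ([] : List (List (String × Int))) ++ [msg])
  else
    (s.1, s.2 ++ [msg])

def build_conversation_windows (chat_messages : List (List (String × Int))) : List (List (List (String × Int))) :=
  let st := chat_messages.foldl pvStep ([], [])
  if st.2 ≠ [] then st.1 ++ [st.2] else st.1

-- ===== PORT B =====
-- the filter predicate of B's boundary comprehension
def pvGapAt (xs : List (List (String × Int))) (i : Int) : Bool :=
  decide (pvTs (PySem.List.pyGetD xs i []) - pvTs (PySem.List.pyGetD xs (i - 1) []) > 3600)

-- starts = [0] + [i for i in range(1, n) if gap] + [n]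
def pvStarts (xs : List (List (String × Int))) : List Int :=
  (0 :: (PySem.List.pyRange 1 (xs.length : Int) 1).filter (pvGapAt xs)) ++ [(xs.length : Int)]

-- [xs[a:b] for a, b in zip(starts, starts[1:])]
def pvWindowsOf (xs : List (List (String × Int))) (starts : List Int) : List (List (List (String × Int))) :=
  (starts.zip starts.tail).map (fun p => PySem.List.slice xs (some p.1) (some p.2))

def build_conversation_windows_alt (chat_messages : List (List (String × Int))) : List (List (List (String × Int))) :=
  if chat_messages = [] then []
  else pvWindowsOf chat_messages (pvStarts chat_messages)

-- ===== PRECONDITION & SPEC =====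
-- Pre_ excludes inputs on which Python A raises KeyError (B too): a message without a
-- "timestamp" key in a list of ≥ 2 messages (with ≤ 1 message the key is never read).
def Pre_build_conversation_windows (chat_messages : List (List (String × Int))) : Prop :=
  2 ≤ chat_messages.length → ∀ m ∈ chat_messages, (m.lookup "timestamp").isSome = true
instance (chat_messages : List (List (String × Int))) : Decidable (Pre_build_conversation_windows chat_messages) := by unfold Pre_build_conversation_windows; infer_instance

def pvWitness_build_conversation_windows : (List (List (String × Int))) :=
  [[("timestamp", 0)], [("timestamp", 5000)]]

def Spec_build_conversation_windows (chat_messages : List (List (String × Int))) (out : List (List (List (String × Int)))) : Prop := out = build_conversation_windows_alt chat_messages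
instance (chat_messages : List (List (String × Int))) (out : List (List (List (String × Int)))) : Decidable (Spec_build_conversation_windows chat_messages out) := by unfold Spec_build_conversation_windows; infer_instance

-- ===== CLAIM (what is proved, stated in full; the proofs are below) =====
def Claim_equal_build_conversation_windows : Prop := ∀ (chat_messages : List (List (String × Int))), Dom_build_conversation_windows chat_messages → Pre_build_conversation_windows chat_messages → Spec_build_conversation_windows chat_messages (build_conversation_windows chat_messages)

-- ===== LEMMAS AND PROOFS =====

-- append x to the last window
def pvExt (x : List (String × Int)) : List (List (List (String × Int))) → List (List (List (String × Int)))
  | [] => []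
  | [w] => [w ++ [x]]
  | w :: v :: ws => w :: pvExt x (v :: ws)

lemma pvExt_append_singleton (x : List (String × Int)) (W : List (List (List (String × Int)))) (C : List (List (String × Int))) :
    pvExt x (W ++ [C]) = W ++ [C ++ [x]] := by
  induction W with
  | nil => rfl
  | cons w ws ih =>
    cases ws with
    | nil => simp [pvExt]
    | cons v vs => simpa [pvExt] using ih

lemma pvGetD_append_left (xs : List (List (String × Int))) (x : List (String × Int)) (i : Int)
    (h0 : 0 ≤ i) (h1 : i < xs.length) (d : List (String × Int)) :
    PySem.List.pyGetD (xs ++ [x]) i d = PySem.List.pyGetD xs i d := by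
  rw [PySem.List.pyGetD_eq_getElem (xs ++ [x]) d h0 (by simp; omega),
      PySem.List.pyGetD_eq_getElem xs d h0 h1]
  exact List.getElem_append_left (by omega)

lemma pvSlice_append_left (xs : List (List (String × Int))) (x : List (String × Int)) (a b : Int)
    (h0 : 0 ≤ a) (ha : a ≤ xs.length) (hb0 : 0 ≤ b) (hb : b ≤ xs.length) :
    PySem.List.slice (xs ++ [x]) (some a) (some b) = PySem.List.slice xs (some a) (some b) := by
  rw [PySem.List.slice_toNat _ h0 hb0, PySem.List.slice_toNat _ h0 hb0]
  rw [List.drop_append_of_le_length (by omega)]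
  exact List.take_append_of_le_length (by simp; omega)

lemma pvSlice_append_last (xs : List (List (String × Int))) (x : List (String × Int)) (a : Int)
    (h0 : 0 ≤ a) (ha : a ≤ xs.length) :
    PySem.List.slice (xs ++ [x]) (some a) (some ((xs.length : Int) + 1)) =
      PySem.List.slice xs (some a) (some (xs.length : Int)) ++ [x] := by
  rw [PySem.List.slice_toNat _ h0 (by omega), PySem.List.slice_toNat _ h0 (by omega)]
  rw [List.drop_append_of_le_length (by omega)]
  rw [List.take_of_length_le (by simp; omega), List.take_of_length_le (by simp)]

-- no new boundary: appending x extends the last window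
lemma pvW1 (xs : List (List (String × Int))) (x : List (String × Int)) :
    ∀ (s : List Int) (a : Int), 0 ≤ a → a ≤ xs.length → (∀ b ∈ s, 0 ≤ b ∧ b ≤ (xs.length : Int)) →
    pvWindowsOf (xs ++ [x]) (a :: (s ++ [(xs.length : Int) + 1])) =
      pvExt x (pvWindowsOf xs (a :: (s ++ [(xs.length : Int)]))) := by
  intro s
  induction s with
  | nil =>
    intro a h0 ha _
    simp [pvWindowsOf, pvExt, pvSlice_append_last xs x a h0 ha]
  | cons b t ih =>
    intro a h0 ha hmem
    obtain ⟨hb0, hbl⟩ := hmem b (by simp)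
    have htail := ih b hb0 hbl (fun c hc => hmem c (by simp [hc]))
    simp only [pvWindowsOf, List.cons_append, List.tail_cons, List.zip_cons_cons, List.map_cons] at htail ⊢
    rw [pvSlice_append_left xs x a b h0 ha hb0 hbl, htail]
    cases t with
    | nil => simp [pvExt]
    | cons c u => simp [pvExt]

-- new boundary at xs.length: appending x adds the window [x]
lemma pvW2 (xs : List (List (String × Int))) (x : List (String × Int)) :
    ∀ (s : List Int) (a : Int), 0 ≤ a → a ≤ xs.length → (∀ b ∈ s, 0 ≤ b ∧ b ≤ (xs.length : Int)) →
    pvWindowsOf (xs ++ [x]) (a :: (s ++ [(xs.length : Int), (xs.length : Int) + 1])) =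
      pvWindowsOf xs (a :: (s ++ [(xs.length : Int)])) ++ [[x]] := by
  intro s
  induction s with
  | nil =>
    intro a h0 ha _
    have h1 : PySem.List.slice (xs ++ [x]) (some a) (some (xs.length : Int)) =
        PySem.List.slice xs (some a) (some (xs.length : Int)) :=
      pvSlice_append_left xs x a _ h0 ha (by omega) (by omega)
    have h2 := pvSlice_append_last xs x (xs.length : Int) (by omega) (by omega)
    have h3 : PySem.List.slice xs (some (xs.length : Int)) (some (xs.length : Int)) = [] := by
      rw [PySem.List.slice_toNat _ (by omega) (by omega)]; simp
    simp [pvWindowsOf, h1, h2, h3]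
  | cons b t ih =>
    intro a h0 ha hmem
    obtain ⟨hb0, hbl⟩ := hmem b (by simp)
    have htail := ih b hb0 hbl (fun c hc => hmem c (by simp [hc]))
    simp only [pvWindowsOf, List.cons_append, List.tail_cons, List.zip_cons_cons, List.map_cons] at htail ⊢
    rw [pvSlice_append_left xs x a b h0 ha hb0 hbl, htail]

-- how B's boundary list grows when one message is appended
lemma pvStarts_append (ys : List (List (String × Int))) (m : List (String × Int)) (hys : ys ≠ []) :
    pvStarts (ys ++ [m]) =
      (0 :: ((PySem.List.pyRange 1 (ys.length : Int) 1).filter (pvGapAt ys) ++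
        (if pvTs m - pvTs (ys.getLast hys) > 3600 then [(ys.length : Int)] else []))) ++
        [(ys.length : Int) + 1] := by
  have hn : 1 ≤ (ys.length : Int) := by
    have := List.length_pos_iff.2 hys; omega
  have hlen : (((ys ++ [m]).length : Int)) = (ys.length : Int) + 1 := by
    simp
  unfold pvStarts
  rw [hlen, PySem.List.pyRange_one_succ_right hn, List.filter_append]
  have hcongr : (PySem.List.pyRange 1 (ys.length : Int) 1).filter (pvGapAt (ys ++ [m])) =
      (PySem.List.pyRange 1 (ys.length : Int) 1).filter (pvGapAt ys) := by
    apply List.filter_congr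
    intro i hi
    rw [PySem.List.mem_pyRange_one] at hi
    unfold pvGapAt
    rw [pvGetD_append_left ys m i (by omega) (by omega),
        pvGetD_append_left ys m (i - 1) (by omega) (by omega)]
  have hgapn : pvGapAt (ys ++ [m]) (ys.length : Int) =
      decide (pvTs m - pvTs (ys.getLast hys) > 3600) := by
    unfold pvGapAt
    rw [PySem.List.pyGetD_eq_getElem (ys ++ [m]) [] (by omega) (by simp)]
    rw [pvGetD_append_left ys m ((ys.length : Int) - 1) (by omega) (by omega)]
    rw [PySem.List.pyGetD_eq_getElem ys [] (by omega) (by omega)]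
    have e2 : ((ys.length : Int) - 1).toNat = ys.length - 1 := by omega
    simp [e2, List.getLast_eq_getElem]
  rw [hcongr]
  simp only [List.filter_cons, List.filter_nil, hgapn]
  by_cases hG : pvTs m - pvTs (ys.getLast hys) > 3600 <;> simp [hG]

-- main invariant of A's fold: windows ++ [current] is exactly B's result
lemma pvMain (xs : List (List (String × Int))) (h : xs ≠ []) :
    (xs.foldl pvStep ([], [])).2 ≠ [] ∧
    (xs.foldl pvStep ([], [])).2.getLast? = xs.getLast? ∧
    (xs.foldl pvStep ([], [])).1 ++ [(xs.foldl pvStep ([], [])).2] =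
      pvWindowsOf xs (pvStarts xs) := by
  induction xs using List.reverseRecOn with
  | nil => exact absurd rfl h
  | append_singleton ys m ih =>
    rcases eq_or_ne ys [] with rfl | hys
    · refine ⟨by simp [pvStep], by simp [pvStep], ?_⟩
      simp [pvStep, pvStarts, pvWindowsOf, PySem.List.pyRange_one_eq_nil,
        PySem.List.slice_toNat]
    · obtain ⟨h1, h2, h3⟩ := ih hys
      set st := ys.foldl pvStep ([], []) with hst
      have hlast : PySem.List.pyGetD st.2 (-1) [] = ys.getLast hys := by
        rw [PySem.List.pyGetD_neg_one st.2 [] h1]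
        have h2' := h2
        rw [List.getLast?_eq_some_getLast h1, List.getLast?_eq_some_getLast hys] at h2'
        exact Option.some.inj h2'
      have hcore : ∀ b ∈ (PySem.List.pyRange 1 (ys.length : Int) 1).filter (pvGapAt ys),
          0 ≤ b ∧ b ≤ (ys.length : Int) := by
        intro b hb
        have hb' := (List.mem_filter.1 hb).1
        rw [PySem.List.mem_pyRange_one] at hb'
        omega
      have hfold : (ys ++ [m]).foldl pvStep ([], []) = pvStep st m := by
        rw [List.foldl_append]; rfl
      have hstarts := pvStarts_append ys m hys
      by_cases hG : pvTs m - pvTs (ys.getLast hys) > 3600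
      · have hcond : st.2 ≠ [] ∧ pvTs m - pvTs (PySem.List.pyGetD st.2 (-1) []) > 3600 :=
          ⟨h1, by rw [hlast]; exact hG⟩
        have hstep : pvStep st m = (st.1 ++ [st.2], [m]) := by
          simp only [pvStep, if_pos hcond, if_pos h1, List.nil_append]
        rw [if_pos hG] at hstarts
        refine ⟨by rw [hfold, hstep]; simp, by rw [hfold, hstep]; simp, ?_⟩
        rw [hfold, hstep, hstarts]
        have hW := pvW2 ys m ((PySem.List.pyRange 1 (ys.length : Int) 1).filter (pvGapAt ys)) 0 le_rfl (by positivity) hcore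
        have hps : (0 : Int) :: ((PySem.List.pyRange 1 (ys.length : Int) 1).filter (pvGapAt ys) ++ [(ys.length : Int)]) = pvStarts ys := by
          simp [pvStarts]
        simp only [List.cons_append, List.append_assoc, List.nil_append] at hW ⊢
        rw [hW, hps, ← h3]
        simp
      · have hcond : ¬ (st.2 ≠ [] ∧ pvTs m - pvTs (PySem.List.pyGetD st.2 (-1) []) > 3600) := by
          rw [hlast]; tauto
        have hstep : pvStep st m = (st.1, st.2 ++ [m]) := by
          simp only [pvStep, if_neg hcond]
        rw [if_neg hG] at hstarts
        refine ⟨by rw [hfold, hstep]; simp, by rw [hfold, hstep]; simp, ?_⟩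
        rw [hfold, hstep, hstarts]
        have hW := pvW1 ys m ((PySem.List.pyRange 1 (ys.length : Int) 1).filter (pvGapAt ys)) 0 le_rfl (by positivity) hcore
        have hps : (0 : Int) :: ((PySem.List.pyRange 1 (ys.length : Int) 1).filter (pvGapAt ys) ++ [(ys.length : Int)]) = pvStarts ys := by
          simp [pvStarts]
        simp only [List.cons_append, List.append_nil] at hW ⊢
        rw [hW, hps, ← h3, pvExt_append_singleton]

-- ===== VERDICT (by name: the statement is the Claim_ definition above) =====
theorem build_conversation_windows_spec : Claim_equal_build_conversation_windows := by
  intro xs _dom _pre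
  unfold Spec_build_conversation_windows
  rcases eq_or_ne xs [] with rfl | hxs
  · simp [build_conversation_windows, build_conversation_windows_alt]
  · obtain ⟨h1, h2, h3⟩ := pvMain xs hxs
    simp only [build_conversation_windows, build_conversation_windows_alt, if_neg hxs]
    rw [if_pos h1]
    exact h3
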